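-- pv_equiv track=rewrite | github.com/The-Jackrabbit/untitled-brockhampton-project | backend/resthampton/app/resthampton/resthampton_app/models.py | format_word
-- ===== SOURCE A (Python) =====
-- def format_word(word):
-- 	symbols_to_delimit_on = ["\n"]
-- 	for sym in symbols_to_delimit_on:
-- 		word = word.replace(sym, " ")
-- 	symbols_to_remove = [",", "\r", ")", "(", "\"", "?"]
-- 	for sym in symbols_to_remove:
-- 		word = word.replace(sym, "")
--
-- 	word = word.lower()
--
-- 	return word
-- ===== SOURCE B (Python) =====
-- TRANSLATE_TABLE = str.maketrans({'\n': ' ', ',': None, '\r': None,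
--                                  ')': None, '(': None, '"': None, '?': None})
--
-- def format_word(word):
-- 	return word.translate(TRANSLATE_TABLE).lower()
-- ===== Notes on version B (the rewrite author's own statement) =====
-- stated objective: idiomatic
-- what changed: Replaces the seven sequential str.replace passes with one precomputed str.maketrans table applied in a single word.translate pass, followed by .lower().
import Mathlib
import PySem

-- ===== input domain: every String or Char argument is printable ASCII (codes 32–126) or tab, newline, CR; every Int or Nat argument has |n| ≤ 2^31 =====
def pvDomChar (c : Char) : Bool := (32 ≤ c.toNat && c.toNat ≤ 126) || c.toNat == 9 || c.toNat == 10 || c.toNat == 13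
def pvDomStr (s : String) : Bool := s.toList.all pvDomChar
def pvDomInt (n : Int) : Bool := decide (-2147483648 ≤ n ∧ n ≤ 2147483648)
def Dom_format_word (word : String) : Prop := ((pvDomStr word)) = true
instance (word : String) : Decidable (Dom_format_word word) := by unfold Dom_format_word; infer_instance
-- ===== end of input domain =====

-- B replaces A's seven sequential str.replace passes by one precomputed translate table
-- applied in a single pass, then .lower(); same return value, no speed claim.

-- ===== PORT A =====
def format_word (word : String) : String :=
  let word := ["\n"].foldl (fun w sym => PySem.Str.replace w sym " ") word
  let word := [",", "\r", ")", "(", "\"", "?"].foldl (fun w sym => PySem.Str.replace w sym "") word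
  PySem.Str.lower word

-- ===== PORT B =====
-- the translate table of Source B: '\n' ↦ ' ', the six punctuation chars ↦ deletion, others ↦ themselves
def pvTable (c : Char) : List Char :=
  if c = '\n' then [' ']
  else if c = ',' ∨ c = '\r' ∨ c = ')' ∨ c = '(' ∨ c = '"' ∨ c = '?' then []
  else [c]

def format_word_alt (word : String) : String :=
  PySem.Str.lower (String.ofList (word.toList.flatMap pvTable))

-- ===== PRECONDITION & SPEC =====
def Spec_format_word (word : String) (out : String) : Prop := out = format_word_alt word
instance (word : String) (out : String) : Decidable (Spec_format_word word out) := by unfold Spec_format_word; infer_instance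

-- ===== CLAIM (what is proved, stated in full; the proofs are below) =====
def Claim_equal_format_word : Prop := ∀ (word : String), Dom_format_word word → Spec_format_word word (format_word word)

-- ===== LEMMAS AND PROOFS =====

-- replace with a single-character pattern is a per-character flatMap
theorem replace_go_single (o : Char) (nw : List Char) :
    ∀ (l : List Char) (fuel : Nat) (acc : List Char), l.length ≤ fuel →
    PySem.Chars.replace.go [o] nw fuel l acc
      = acc.reverse ++ l.flatMap (fun c => if c = o then nw else [c]) := by
  intro l
  induction l with
  | nil =>
    intro fuel acc _
    cases fuel <;> simp [PySem.Chars.replace.go]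
  | cons c t ih =>
    intro fuel acc h
    simp only [List.length_cons] at h
    cases fuel with
    | zero => omega
    | succ f =>
      simp only [List.flatMap_cons]
      by_cases hc : o = c
      · subst hc
        rw [show PySem.Chars.replace.go [o] nw (f+1) (o::t) acc
              = PySem.Chars.replace.go [o] nw f t (nw.reverse ++ acc) by
            simp [PySem.Chars.replace.go, List.isPrefixOf]]
        rw [ih f (nw.reverse ++ acc) (by omega)]
        simp
      · rw [show PySem.Chars.replace.go [o] nw (f+1) (c::t) acc
              = PySem.Chars.replace.go [o] nw f t (c :: acc) by
            simp [PySem.Chars.replace.go, List.isPrefixOf, beq_eq_false_iff_ne.mpr hc]]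
        rw [ih f (c :: acc) (by omega), if_neg (fun h' : c = o => hc h'.symm)]
        simp

theorem replace_single (s : List Char) (o : Char) (nw : List Char) :
    PySem.Chars.replace s [o] nw = s.flatMap (fun c => if c = o then nw else [c]) := by
  rw [show PySem.Chars.replace s [o] nw = PySem.Chars.replace.go [o] nw s.length s [] by
    simp [PySem.Chars.replace]]
  simpa using replace_go_single o nw s s.length [] (le_refl _)

-- the composed per-character action of A's replace chain + lower equals B's table + lower
theorem table_pointwise (c : Char) :
    List.flatMap
      (fun a =>
        List.flatMap
          (fun a =>
            List.flatMap
              (fun a =>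
                List.flatMap
                  (fun a =>
                    List.flatMap
                      (fun a =>
                        List.flatMap (fun a => List.map PySem.Chars.lowerChar (if a = '?' then [] else [a]))
                          (if a = '\"' then [] else [a]))
                      (if a = '(' then [] else [a]))
                  (if a = ')' then [] else [a]))
              (if a = '\r' then [] else [a]))
          (if a = ',' then [] else [a]))
      (if c = '\n' then [' '] else [c])
      = List.map PySem.Chars.lowerChar (pvTable c) := by
  unfold pvTable
  by_cases h1 : c = '\n'; · simp [*]
  by_cases h2 : c = ','; · simp [*]
  by_cases h3 : c = '\r'; · simp [*]
  by_cases h4 : c = ')'; · simp [*]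
  by_cases h5 : c = '('; · simp [*]
  by_cases h6 : c = '\"'; · simp [*]
  by_cases h7 : c = '?'; · simp [*]
  simp [*]

-- ===== VERDICT (by name: the statement is the Claim_ definition above) =====
theorem format_word_spec : Claim_equal_format_word := by
  intro word _
  unfold Spec_format_word format_word format_word_alt
  rw [← String.toList_inj]
  simp only [List.foldl_cons, List.foldl_nil, PySem.Str.toList_lower, PySem.Str.toList_replace,
    PySem.Chars.lower, String.toList_ofList]
  rw [show ("\n" : String).toList = ['\n'] by rfl,
      show (" " : String).toList = [' '] by rfl,
      show ("," : String).toList = [','] by rfl,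
      show ("\r" : String).toList = ['\r'] by rfl,
      show (")" : String).toList = [')'] by rfl,
      show ("(" : String).toList = ['('] by rfl,
      show ("\"" : String).toList = ['"'] by rfl,
      show ("?" : String).toList = ['?'] by rfl,
      show ("" : String).toList = [] by rfl]
  simp only [replace_single, List.flatMap_assoc, List.map_flatMap]
  exact List.flatMap_congr (fun c _ => table_pointwise c)
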